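-- pv_equiv track=rewrite | github.com/differential-neural-cryptanalysis/speck32_simon32 | simon/simon.py | expand_keys
-- ===== SOURCE A (Python) =====
-- from collections import deque
--
-- def WORD_SIZE():
--     return 16
--
-- z_0 = 0b01100111000011010100100010111110110011100001101010010001011111
--
-- MOD_MASK = (2 ** WORD_SIZE()) - 1
--
-- c = MOD_MASK ^ 3
--
-- def expand_keys(key, rounds):
--     k_tmp = deque(key)
--     keys = []
--     for i in range(rounds):
--         rs_3 = ((k_tmp[0] << (WORD_SIZE() - 3)) + (k_tmp[0] >> 3)) & MOD_MASK
--         # m= 4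
--         rs_3 = rs_3 ^ k_tmp[2]
--         #
--         rs_1 = ((rs_3 << (WORD_SIZE() - 1)) + (rs_3 >> 1)) & MOD_MASK
--         tmp = rs_3 ^ rs_1
--         z = (z_0 >> (i % 62)) & 1
--         new_k = z ^ c ^ k_tmp[3] ^ tmp
--         keys.append(k_tmp.pop())
--         k_tmp.appendleft(new_k)
--     return keys
-- ===== SOURCE B (Python) =====
-- WORD_SIZE = 16
-- z_0 = 0b01100111000011010100100010111110110011100001101010010001011111
-- MOD_MASK = (2 ** WORD_SIZE) - 1
-- c = MOD_MASK ^ 3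
--
-- def _ror(x, r):
--     return ((x << (WORD_SIZE - r)) + (x >> r)) & MOD_MASK
--
-- def expand_keys(key, rounds):
--     m = len(key)
--     keys = list(reversed(key))
--     for j in range(m, rounds):
--         rs_3 = _ror(keys[j - 1], 3) ^ keys[j - 3]
--         tmp = rs_3 ^ _ror(rs_3, 1)
--         z = (z_0 >> ((j - m) % 62)) & 1
--         keys.append(z ^ c ^ keys[j - 4] ^ tmp)
--     return keys[:max(rounds, 0)]
-- ===== Notes on version B (the rewrite author's own statement) =====
-- stated objective: faster
-- what changed: Replaces A's reverse-ordered sliding deque window (index/pop/appendleft each round, recomputing the round function even for rounds whose result is only popped back out) with direct indexing into the accumulated schedule list built from reversed(key): only the rounds beyond len(key) are generated and the output is a final slice.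
import Mathlib
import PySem

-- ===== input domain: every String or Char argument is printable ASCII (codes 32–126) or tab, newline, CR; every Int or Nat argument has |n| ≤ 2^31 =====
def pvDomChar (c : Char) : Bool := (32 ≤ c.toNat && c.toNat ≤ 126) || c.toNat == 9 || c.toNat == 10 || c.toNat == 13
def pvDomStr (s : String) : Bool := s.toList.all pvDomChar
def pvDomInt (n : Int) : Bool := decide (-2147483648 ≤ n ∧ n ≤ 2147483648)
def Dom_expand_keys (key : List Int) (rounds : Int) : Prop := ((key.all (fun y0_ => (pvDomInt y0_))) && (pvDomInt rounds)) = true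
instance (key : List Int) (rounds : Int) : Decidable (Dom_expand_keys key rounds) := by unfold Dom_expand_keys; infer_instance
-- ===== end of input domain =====

-- B replaces A's reverse-ordered sliding deque window with direct indexing into the
-- accumulated schedule list, skipping the first len(key) rounds' recomputation (measured faster).

-- ===== PORT A =====
def pvWORDSIZE : Nat := 16                               -- WORD_SIZE()
def pvZ0 : Int := 0b01100111000011010100100010111110110011100001101010010001011111
def pvMODMASK : Int := 2 ^ pvWORDSIZE - 1
def pvC : Int := PySem.Int.bxor pvMODMASK 3

-- A's loop, one iteration per fuel unit: i = loop counter, state = (k_tmp deque as list, keys)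
def pvAGo : Nat → Nat → List Int × List Int → List Int × List Int
  | 0, _, st => st
  | n + 1, i, (ktmp, keys) =>
    let k0 := (PySem.List.pyGet? ktmp 0).getD 0
    let rs3 := PySem.Int.band ((k0 <<< (pvWORDSIZE - 3)) + (k0 >>> (3 : Nat))) pvMODMASK
    let rs3 := PySem.Int.bxor rs3 ((PySem.List.pyGet? ktmp 2).getD 0)
    let rs1 := PySem.Int.band ((rs3 <<< (pvWORDSIZE - 1)) + (rs3 >>> (1 : Nat))) pvMODMASK
    let tmp := PySem.Int.bxor rs3 rs1
    let z := PySem.Int.band (pvZ0 >>> (i % 62)) 1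
    let newk := PySem.Int.bxor (PySem.Int.bxor (PySem.Int.bxor z pvC) ((PySem.List.pyGet? ktmp 3).getD 0)) tmp
    let popped := ktmp.getLast?.getD 0                    -- k_tmp.pop(); empty deque excluded by Pre_
    pvAGo n (i + 1) (newk :: ktmp.dropLast, keys ++ [popped])

def expand_keys (key : List Int) (rounds : Int) : List Int :=
  (pvAGo rounds.toNat 0 (key, [])).2

-- ===== PORT B =====
def pvRor (x : Int) (r : Nat) : Int :=                    -- _ror(x, r)
  PySem.Int.band ((x <<< (pvWORDSIZE - r)) + (x >>> r)) pvMODMASK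

-- B's loop: j runs over range(m, rounds); keys is the accumulated schedule
def pvBGo : Nat → Nat → Nat → List Int → List Int
  | 0, _, _, keys => keys
  | n + 1, j, m, keys =>
    let rs3 := PySem.Int.bxor (pvRor ((PySem.List.pyGet? keys ((j : Int) - 1)).getD 0) 3)
                 ((PySem.List.pyGet? keys ((j : Int) - 3)).getD 0)
    let tmp := PySem.Int.bxor rs3 (pvRor rs3 1)
    let z := PySem.Int.band (pvZ0 >>> ((j - m) % 62)) 1
    pvBGo n (j + 1) m
      (keys ++ [PySem.Int.bxor (PySem.Int.bxor (PySem.Int.bxor z pvC) ((PySem.List.pyGet? keys ((j : Int) - 4)).getD 0)) tmp])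

def expand_keys_alt (key : List Int) (rounds : Int) : List Int :=
  let m := key.length
  let res := pvBGo (rounds - (m : Int)).toNat m m key.reverse
  PySem.List.slice res none (some (max rounds 0))         -- keys[:max(rounds, 0)]

-- ===== PRECONDITION & SPEC =====
-- A raises IndexError (deque index / deque pop) as soon as the loop runs with fewer than 4 key
-- words; Pre_ excludes exactly those inputs (rounds ≥ 1 with len(key) < 4).
def Pre_expand_keys (key : List Int) (rounds : Int) : Prop := rounds ≤ 0 ∨ 4 ≤ key.length
instance (key : List Int) (rounds : Int) : Decidable (Pre_expand_keys key rounds) := by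
  unfold Pre_expand_keys; infer_instance

def pvWitness_expand_keys : List Int × Int := ([1, 2, 3, 4], 8)

def Spec_expand_keys (key : List Int) (rounds : Int) (out : List Int) : Prop := out = expand_keys_alt key rounds
instance (key : List Int) (rounds : Int) (out : List Int) : Decidable (Spec_expand_keys key rounds out) := by
  unfold Spec_expand_keys; infer_instance

-- ===== CLAIM (what is proved, stated in full; the proofs are below) =====
def Claim_equal_expand_keys : Prop := ∀ (key : List Int) (rounds : Int), Dom_expand_keys key rounds → Pre_expand_keys key rounds → Spec_expand_keys key rounds (expand_keys key rounds)

-- ===== LEMMAS AND PROOFS =====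

-- the common schedule: pvSched key n = the first (len key + n) schedule words, oldest first
def pvStep (s : List Int) (i : Nat) : Int :=
  let rs3 := PySem.Int.bxor (pvRor (s.getD (s.length - 1) 0) 3) (s.getD (s.length - 3) 0)
  let tmp := PySem.Int.bxor rs3 (pvRor rs3 1)
  let z := PySem.Int.band (pvZ0 >>> (i % 62)) 1
  PySem.Int.bxor (PySem.Int.bxor (PySem.Int.bxor z pvC) (s.getD (s.length - 4) 0)) tmp

def pvSched (key : List Int) : Nat → List Int
  | 0 => key.reverse
  | n + 1 => pvSched key n ++ [pvStep (pvSched key n) n]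

theorem pvSched_length (key : List Int) (n : Nat) : (pvSched key n).length = key.length + n := by
  induction n with
  | zero => simp [pvSched]
  | succ n ih => simp [pvSched, ih]; omega

-- element d (from the front) of A's deque window over s is schedule word s.length - 1 - d
theorem pvWinElem (s : List Int) (m d : Nat) (hd : d < m) (hm : m ≤ s.length)
    (h' : d < (s.reverse.take m).length) :
    (s.reverse.take m)[d]'h' = s.getD (s.length - 1 - d) 0 := by
  rw [List.getElem_take, List.getElem_reverse, List.getD_eq_getElem]

theorem pvWinDrop (s : List Int) (m : Nat) (hm : m ≤ s.length) :
    (s.reverse.take m).dropLast = s.reverse.take (m - 1) := by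
  rw [List.dropLast_eq_take, List.take_take, List.length_take, List.length_reverse]
  congr 1; omega

theorem pvAGet (s : List Int) (m d : Nat) (hd : d < m) (hm : m ≤ s.length) :
    (PySem.List.pyGet? (s.reverse.take m) (d : Int)).getD 0 = s.getD (s.length - 1 - d) 0 := by
  have h' : d < (s.reverse.take m).length := by simp; omega
  rw [PySem.List.pyGet?_ofNat _ d h', Option.getD_some, pvWinElem s m d hd hm h']

-- A's loop invariant: the deque window is the reversed tail of the schedule, the output its prefix
theorem pvALoop (key : List Int) (hm : 4 ≤ key.length) (n : Nat) : ∀ i : Nat,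
    pvAGo n i ((pvSched key i).reverse.take key.length, (pvSched key i).take i)
      = ((pvSched key (i + n)).reverse.take key.length, (pvSched key (i + n)).take (i + n)) := by
  induction n with
  | zero => intro i; simp [pvAGo]
  | succ n ih =>
    intro i
    have hlen : (pvSched key i).length = key.length + i := pvSched_length key i
    have hml : key.length ≤ (pvSched key i).length := by omega
    have h0 := pvAGet (pvSched key i) key.length 0 (by omega) hml
    have h2 := pvAGet (pvSched key i) key.length 2 (by omega) hml
    have h3 := pvAGet (pvSched key i) key.length 3 (by omega) hml
    have hlast : ((pvSched key i).reverse.take key.length).getLast?.getD 0 = (pvSched key i).getD i 0 := by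
      rw [List.getLast?_eq_getElem?]
      have hWlen : ((pvSched key i).reverse.take key.length).length = key.length := by simp; omega
      rw [hWlen, List.getElem?_eq_getElem (by rw [hWlen]; omega),
          pvWinElem _ _ _ (by omega) hml, Option.getD_some]
      congr 1; omega
    rw [show (pvSched key i).length - 1 - 2 = (pvSched key i).length - 3 by omega] at h2
    rw [show (pvSched key i).length - 1 - 3 = (pvSched key i).length - 4 by omega] at h3
    rw [show (pvSched key i).length - 1 - 0 = (pvSched key i).length - 1 by omega] at h0
    have hwin : (pvSched key (i+1)).reverse.take key.length
        = pvStep (pvSched key i) i :: (pvSched key i).reverse.take (key.length - 1) := by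
      show ((pvSched key i) ++ [pvStep (pvSched key i) i]).reverse.take key.length = _
      rw [List.reverse_append, List.reverse_singleton, List.singleton_append,
          show key.length = (key.length - 1) + 1 by omega, List.take_succ_cons]
      simp
    have hout : (pvSched key (i+1)).take (i+1) = (pvSched key i).take i ++ [(pvSched key i).getD i 0] := by
      show ((pvSched key i) ++ [pvStep (pvSched key i) i]).take (i+1) = _
      rw [List.take_append_of_le_length (by omega), List.take_add_one,
          List.getElem?_eq_getElem (by omega), List.getD_eq_getElem _ _ (by omega)]
      rfl
    norm_cast at h0 h2 h3
    show pvAGo (n+1) i _ = _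
    rw [pvAGo]
    rw [h0, h2, h3, hlast, pvWinDrop _ _ hml]
    rw [show i + (n+1) = (i+1) + n by omega, ← ih (i+1)]
    congr 1
    rw [hwin, hout]
    simp only [pvStep, pvRor]
  
-- B's loop reads schedule words m+t-1, m+t-3, m+t-4 directly
theorem pvBGet (key : List Int) (t d : Nat) (hm : 4 ≤ key.length) (hd : 1 ≤ d) (hd4 : d ≤ 4) :
    (PySem.List.pyGet? (pvSched key t) (((key.length + t : Nat) : Int) - (d : Int))).getD 0
      = (pvSched key t).getD ((pvSched key t).length - d) 0 := by
  have hlen := pvSched_length key t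
  have e1 : ((key.length + t : Nat) : Int) - (d : Int) = ((key.length + t - d : Nat) : Int) := by
    push_cast; omega
  rw [e1, PySem.List.pyGet?_natCast, ← List.getD_eq_getElem?_getD]
  congr 1; omega

theorem pvBLoop (key : List Int) (hm : 4 ≤ key.length) (n : Nat) : ∀ t : Nat,
    pvBGo n (key.length + t) key.length (pvSched key t) = pvSched key (t + n) := by
  induction n with
  | zero => intro t; simp [pvBGo]
  | succ n ih =>
    intro t
    have h1 := pvBGet key t 1 hm (by omega) (by omega)
    have h3 := pvBGet key t 3 hm (by omega) (by omega)
    have h4 := pvBGet key t 4 hm (by omega) (by omega)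
    simp only [Nat.cast_one, Nat.cast_ofNat] at h1 h3 h4
    show pvBGo (n+1) (key.length + t) key.length (pvSched key t) = _
    rw [pvBGo]
    rw [h1, h3, h4, Nat.add_sub_cancel_left,
        show key.length + t + 1 = key.length + (t + 1) by omega,
        show t + (n+1) = (t+1) + n by omega, ← ih (t+1)]
    congr 1

theorem pvSched_prefix (key : List Int) (n k : Nat) : pvSched key n <+: pvSched key (n + k) := by
  induction k with
  | zero => simp
  | succ k ih =>
    have h : pvSched key (n + (k + 1)) = pvSched key (n + k) ++ [pvStep (pvSched key (n + k)) (n + k)] := by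
      show pvSched key ((n + k) + 1) = _
      simp [pvSched]
    rw [h]
    exact ih.trans (List.prefix_append _ _)

-- a prefix of the schedule does not depend on how far the schedule was computed
theorem pvSched_take (key : List Int) (n n' R : Nat) (h : n ≤ n') (hR : R ≤ key.length + n) :
    (pvSched key n').take R = (pvSched key n).take R := by
  have hp := pvSched_prefix key n (n' - n)
  rw [show n + (n' - n) = n' by omega] at hp
  rw [List.prefix_iff_eq_take] at hp
  rw [pvSched_length] at hp
  conv_lhs => rw [show R = min R (key.length + n) by omega, ← List.take_take, ← hp]

-- ===== VERDICT (by name: the statement is the Claim_ definition above) =====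
theorem expand_keys_spec : Claim_equal_expand_keys := by
  unfold Claim_equal_expand_keys Spec_expand_keys Pre_expand_keys
  intro key rounds _ hpre
  unfold expand_keys expand_keys_alt
  simp only []
  rw [PySem.List.slice_to _ (by omega : (0:Int) ≤ max rounds 0)]
  by_cases hr : rounds ≤ 0
  · rw [show rounds.toNat = 0 by omega, show (rounds - (key.length : Int)).toNat = 0 by omega,
        show (max rounds 0).toNat = 0 by omega]
    simp [pvAGo, pvBGo]
  · have hm : 4 ≤ key.length := hpre.resolve_left hr
    have hmax : (max rounds 0).toNat = rounds.toNat := by omega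
    rw [hmax]
    have hs0 : (pvSched key 0).reverse.take key.length = key := by
      show key.reverse.reverse.take key.length = key
      simp
    have hA := pvALoop key hm rounds.toNat 0
    rw [hs0] at hA
    simp only [List.take_zero, Nat.zero_add] at hA
    rw [hA]
    by_cases hrm : rounds ≤ (key.length : Int)
    · rw [show (rounds - (key.length : Int)).toNat = 0 by omega]
      show _ = (pvSched key 0).take rounds.toNat
      rw [pvSched_take key 0 rounds.toNat rounds.toNat (by omega) (by omega)]
    · have hB := pvBLoop key hm (rounds - (key.length : Int)).toNat 0
      simp only [Nat.add_zero, Nat.zero_add] at hB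
      show _ = ((pvBGo (rounds - (key.length : Int)).toNat key.length key.length (pvSched key 0)).take rounds.toNat)
      rw [hB]
      rw [pvSched_take key (rounds - (key.length : Int)).toNat rounds.toNat rounds.toNat (by omega) (by omega)]
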